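-- pv_equiv track=rewrite | github.com/heuristicwave/-TrainingGround | Programmers/DFS&BFS/타겟넘버.py | dfs
-- ===== SOURCE A (Python) =====
-- def dfs(numbers, target, cur_num, depth):
--     total = 0
--
--     if depth == len(numbers):
--         if cur_num == target:
--             return 1    # count++
--         else:
--             return 0
--
--     # depth same as index order
--     total += dfs(numbers, target, cur_num+numbers[depth], depth+1)
--     total += dfs(numbers, target, cur_num-numbers[depth], depth+1)
--
--     return total
-- ===== SOURCE B (Python) =====
-- def dfs(numbers, target, cur_num, depth):
--     # Iterative frontier expansion (BFS over partial sums) instead of binary recursion.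
--     frontier = [cur_num]
--     for i in range(depth, len(numbers)):
--         x = numbers[i]
--         frontier = [s + x for s in frontier] + [s - x for s in frontier]
--     return frontier.count(target)
-- ===== Notes on version B (the rewrite author's own statement) =====
-- stated objective: alternative
-- what changed: Replaces the binary recursion (two recursive calls per element) with an iterative breadth-first expansion: one loop over the remaining indices maintaining the list of all reachable partial sums, then counting the target in the final frontier.
import Mathlib
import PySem

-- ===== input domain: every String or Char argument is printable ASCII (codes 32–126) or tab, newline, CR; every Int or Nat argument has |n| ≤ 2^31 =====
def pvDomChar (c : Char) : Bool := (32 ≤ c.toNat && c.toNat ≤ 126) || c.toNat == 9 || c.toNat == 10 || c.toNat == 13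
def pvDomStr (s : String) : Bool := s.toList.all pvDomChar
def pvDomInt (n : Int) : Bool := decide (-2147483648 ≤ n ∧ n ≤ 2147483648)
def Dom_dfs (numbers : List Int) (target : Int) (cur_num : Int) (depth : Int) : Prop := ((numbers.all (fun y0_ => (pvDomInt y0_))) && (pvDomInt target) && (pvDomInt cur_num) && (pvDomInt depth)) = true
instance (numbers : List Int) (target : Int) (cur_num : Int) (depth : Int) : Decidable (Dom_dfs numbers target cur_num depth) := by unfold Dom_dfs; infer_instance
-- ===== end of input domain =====

-- B replaces A's binary recursion by an iterative breadth-first expansion of the list of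
-- reachable partial sums (objective: alternative decomposition, same asymptotic cost).

-- ===== PORT A =====
-- literal port of A's recursion; pyGet? none = IndexError, excluded by Pre_
def dfs (numbers : List Int) (target : Int) (cur_num : Int) (depth : Int) : Int :=
  if depth = (numbers.length : Int) then
    if cur_num = target then 1 else 0
  else
    match h : PySem.List.pyGet? numbers depth with
    | none => 0  -- Python raises IndexError here; outside Pre_
    | some x =>
        dfs numbers target (cur_num + x) (depth + 1) +
        dfs numbers target (cur_num - x) (depth + 1)
termination_by ((numbers.length : Int) - depth).toNat
decreasing_by
  all_goals
    have hin : ¬ (PySem.List.pyGet? numbers depth = none) := by simp [h]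
    rw [PySem.List.pyGet?_eq_none_iff] at hin
    have := not_not.mp hin
    unfold PySem.Raise.InRange at this
    omega

-- ===== PORT B =====
-- port of Source B: loop i over range(depth, len(numbers)) expanding the frontier list
def dfs_alt (numbers : List Int) (target : Int) (cur_num : Int) (depth : Int) : Int :=
  let frontier :=
    (PySem.List.pyRange depth (numbers.length : Int) 1).foldl
      (fun fr i =>
        match PySem.List.pyGet? numbers i with
        | none => fr   -- Python raises IndexError here; outside Pre_
        | some x => fr.map (fun s => s + x) ++ fr.map (fun s => s - x))
      [cur_num]
  (PySem.List.count frontier target : Int)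

-- ===== PRECONDITION & SPEC =====
-- Pre_ excludes exactly the inputs where the Python programs raise IndexError:
-- A raises for depth > len(numbers) and both raise for depth < -len(numbers).
def Pre_dfs (numbers : List Int) (target : Int) (cur_num : Int) (depth : Int) : Prop :=
  -(numbers.length : Int) ≤ depth ∧ depth ≤ (numbers.length : Int)
instance (numbers : List Int) (target : Int) (cur_num : Int) (depth : Int) : Decidable (Pre_dfs numbers target cur_num depth) := by unfold Pre_dfs; infer_instance

def pvWitness_dfs : List Int × Int × Int × Int := ([1, 1, 2], 2, 0, 0)

def Spec_dfs (numbers : List Int) (target : Int) (cur_num : Int) (depth : Int) (out : Int) : Prop := out = dfs_alt numbers target cur_num depth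
instance (numbers : List Int) (target : Int) (cur_num : Int) (depth : Int) (out : Int) : Decidable (Spec_dfs numbers target cur_num depth out) := by unfold Spec_dfs; infer_instance

-- ===== CLAIM (what is proved, stated in full; the proofs are below) =====
def Claim_equal_dfs : Prop := ∀ (numbers : List Int) (target : Int) (cur_num : Int) (depth : Int), Dom_dfs numbers target cur_num depth → Pre_dfs numbers target cur_num depth → Spec_dfs numbers target cur_num depth (dfs numbers target cur_num depth)

-- ===== LEMMAS AND PROOFS =====

-- the body of B's fold
def pvStep (numbers : List Int) (fr : List Int) (i : Int) : List Int :=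
  match PySem.List.pyGet? numbers i with
  | none => fr
  | some x => fr.map (fun s => s + x) ++ fr.map (fun s => s - x)

lemma pvSum_map_add (L : List Int) (f g : Int → Int) :
    (L.map (fun s => f s + g s)).sum = (L.map f).sum + (L.map g).sum := by
  induction L with
  | nil => simp
  | cons a t ih => simp [ih]; ring

-- invariant: counting target in the expanded frontier = sum of dfs over the frontier
lemma pvLoop_eq (numbers : List Int) (target : Int) :
    ∀ (k : Nat) (i : Int), -(numbers.length : Int) ≤ i → i ≤ (numbers.length : Int) →
      ((numbers.length : Int) - i).toNat = k →
      ∀ (L : List Int),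
        ((PySem.List.count ((PySem.List.pyRange i (numbers.length : Int) 1).foldl
            (pvStep numbers) L) target : Int)) =
          (L.map (fun s => dfs numbers target s i)).sum := by
  intro k
  induction k with
  | zero =>
    intro i h1 h2 hk L
    have hi : i = (numbers.length : Int) := by omega
    subst hi
    rw [PySem.List.pyRange_one_eq_nil (by omega)]
    simp only [List.foldl_nil]
    rw [show (fun s => dfs numbers target s (numbers.length : Int)) =
          (fun s => if s = target then (1:Int) else 0) from funext (fun s => by
            rw [dfs]; simp)]
    rw [PySem.List.count_eq]
    rw [show (fun s => if s = target then (1:Int) else 0) =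
          (fun s => if (s == target) = true then (1:Int) else 0) from funext (fun s => by
            by_cases h : s = target <;> simp [h])]
    rw [PySem.List.sum_map_ite_one_zero]
    rw [List.count_eq_countP]
  | succ k ih =>
    intro i h1 h2 hk L
    have hlt : i < (numbers.length : Int) := by omega
    rw [PySem.List.pyRange_one_cons hlt]
    simp only [List.foldl_cons]
    obtain ⟨x, hx⟩ : ∃ x, PySem.List.pyGet? numbers i = some x := by
      cases hg : PySem.List.pyGet? numbers i with
      | none =>
        rw [PySem.List.pyGet?_eq_none_iff] at hg
        exact absurd (by unfold PySem.Raise.InRange; omega) hg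
      | some x => exact ⟨x, rfl⟩
    have hstep : pvStep numbers L i =
        L.map (fun s => s + x) ++ L.map (fun s => s - x) := by
      unfold pvStep; rw [hx]
    rw [hstep, ih (i + 1) (by omega) (by omega) (by omega)]
    rw [List.map_append, List.sum_append, List.map_map, List.map_map]
    rw [← pvSum_map_add]
    refine congrArg List.sum (List.map_congr_left fun s _ => ?_)
    simp only [Function.comp]
    rw [show dfs numbers target s i =
          dfs numbers target (s + x) (i + 1) + dfs numbers target (s - x) (i + 1) from by
      rw [dfs]
      rw [if_neg (by omega)]
      rw [hx]]

-- ===== VERDICT (by name: the statement is the Claim_ definition above) =====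
theorem dfs_spec : Claim_equal_dfs := by
  intro numbers target cur_num depth _ hpre
  unfold Spec_dfs dfs_alt
  have := pvLoop_eq numbers target ((numbers.length : Int) - depth).toNat depth
    hpre.1 hpre.2 rfl [cur_num]
  simp only [List.map_cons, List.map_nil, List.sum_cons, List.sum_nil, add_zero] at this
  rw [show (fun fr i => match PySem.List.pyGet? numbers i with
        | none => fr
        | some x => fr.map (fun s => s + x) ++ fr.map (fun s => s - x)) =
      pvStep numbers from rfl]
  exact this.symm
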